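-- pv_equiv track=rewrite | github.com/MarioGuerra21008/LabC-LexAnalyzerGen | lexicalAnalyzerGen.py | question_mark
-- ===== SOURCE A (Python) =====
-- def question_mark(expression):
--
--     stack = []
--     groups = ""
--     in_group = ""
--     for i, ch in enumerate(expression):
--         if ch in "{([":
--             groups += ch
--         elif ch in "})]":
--             groups = groups[:-1]
--             if len(groups) == 0:
--                 in_group = in_group[1:]
--                 not_questioned = question_mark(in_group)
--                 stack.append("(" + not_questioned + ")?")  # Cambio aquí: agrega el operador '?' después de la agrupación
--                 continue
--         if len(groups) != 0:
--             in_group += ch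
--         else:
--             stack.append(ch)
--     return "".join(stack)
-- ===== SOURCE B (Python) =====
-- def question_mark(expression):
--     # Iterative reformulation: A's recursion-on-substring is replaced by an
--     # explicit stack of frames (remaining text, output parts, depth, buffer).
--     frames = [[expression, [], 0, ""]]
--     ret = None
--     while frames:
--         fr = frames[-1]
--         if ret is not None:
--             fr[1].append("(" + ret + ")?")
--             ret = None
--         rem, out, depth, buf = fr
--         if not rem:
--             frames.pop()
--             ret = "".join(out)
--             continue
--         ch = rem[0]
--         fr[0] = rem[1:]
--         if ch in "{([":
--             fr[2] = depth + 1
--             fr[3] = buf + ch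
--         elif ch in "})]":
--             if depth <= 1:
--                 child = buf[1:]
--                 fr[2] = 0
--                 fr[3] = child
--                 frames.append([child, [], 0, ""])
--             else:
--                 fr[2] = depth - 1
--                 fr[3] = buf + ch
--         elif depth > 0:
--             fr[3] = buf + ch
--         else:
--             out.append(ch)
--     return ret if ret is not None else ""
-- ===== Notes on version B (the rewrite author's own statement) =====
-- stated objective: alternative
-- what changed: Replaced A's recursion-on-substring (re-calling question_mark on each buffered group) by a single iterative while-loop over an explicit stack of frames (remaining text, output parts, depth, buffer), i.e. a manually defunctionalised machine with no recursive calls.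
import Mathlib
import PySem

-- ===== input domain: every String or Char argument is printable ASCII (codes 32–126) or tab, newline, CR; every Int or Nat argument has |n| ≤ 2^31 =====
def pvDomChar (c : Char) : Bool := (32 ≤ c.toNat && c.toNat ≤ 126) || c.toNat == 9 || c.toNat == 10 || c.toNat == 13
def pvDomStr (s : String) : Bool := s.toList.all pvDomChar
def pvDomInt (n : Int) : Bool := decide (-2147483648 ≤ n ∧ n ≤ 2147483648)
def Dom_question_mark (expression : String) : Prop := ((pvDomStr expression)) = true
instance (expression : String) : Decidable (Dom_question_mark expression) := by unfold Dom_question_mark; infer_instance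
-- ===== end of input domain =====

-- B replaces A's recursion-on-substring by a single iterative pass with an explicit
-- stack of frames (objective: alternative; same return value everywhere).

-- ===== PORT A =====
-- Arithmetic helper lemmas cited by the termination proofs of the two ports
-- (kept as small hand-written terms).
theorem qm_add1 (r i : Nat) : r + (i + 1) = r + 1 + i := by
  rw [← Nat.add_assoc, Nat.add_right_comm]

theorem qm_sq_le (d f a b : Nat) (h1 : d ≤ f) (h2 : a ≤ b) :
    d * d + a < f * f + (b + 1) :=
  Nat.lt_of_le_of_lt (Nat.add_le_add (Nat.mul_le_mul h1 h1) h2)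
    (Nat.add_lt_add_left (Nat.lt_succ_self b) (f * f))

theorem qm_sq_lt (d f c : Nat) (h : d < f) : d * d + d < f * f + c :=
  Nat.lt_of_lt_of_le
    (Nat.lt_of_le_of_lt (Nat.le_of_eq (by rw [Nat.mul_succ]))
      (Nat.lt_of_lt_of_le (mul_lt_mul_of_pos_right h (Nat.succ_pos d))
        (Nat.mul_le_mul_left f (Nat.succ_le_of_lt h))))
    (Nat.le_add_right (f * f) c)

theorem qm_sub_lt (r i : Nat) : i - 1 < r + 1 + i := by
  have h1 : i - 1 < i + 1 := Nat.lt_succ_of_le (Nat.sub_le i 1)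
  have h2 : i + 1 ≤ r + 1 + i := by
    rw [Nat.add_right_comm]
    exact Nat.add_le_add_right (Nat.le_add_left i r) 1
  exact Nat.lt_of_lt_of_le h1 h2

-- Literal transliteration of A: a for-loop over the characters carrying
-- (stack, groups, in_group), with the top-level recursive call on in_group[1:]
-- at each close that empties `groups`.  Python strings `groups`/`in_group` are
-- List Char; `[:-1]` is dropLast, `[1:]` is drop 1, `"".join` is String.join.
def qmGoA : List Char → List String → List Char → List Char → List String
  | [], stack, _, _ => stack
  | ch :: rest, stack, groups, in_group =>
    if ch = '{' ∨ ch = '(' ∨ ch = '[' then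
      -- groups += ch, then (groups nonempty) in_group += ch
      qmGoA rest stack (groups ++ [ch]) (in_group ++ [ch])
    else if ch = '}' ∨ ch = ')' ∨ ch = ']' then
      if groups.dropLast = [] then
        -- in_group = in_group[1:]; stack.append("(" + question_mark(in_group) + ")?"); continue
        qmGoA rest
          (stack ++ ["(" ++ String.join (qmGoA (in_group.drop 1) [] [] []) ++ ")?"])
          groups.dropLast (in_group.drop 1)
      else
        qmGoA rest stack groups.dropLast (in_group ++ [ch])
    else if groups ≠ [] then
      qmGoA rest stack groups (in_group ++ [ch])
    else
      qmGoA rest (stack ++ [String.singleton ch]) groups in_group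
termination_by l _ _ ig => (l.length + ig.length) * (l.length + ig.length) + l.length
decreasing_by
  all_goals simp only [List.length_cons, List.length_append, List.length_drop,
    List.length_nil, Nat.add_zero, Nat.zero_add]
  · exact qm_sq_le _ _ _ _ (Nat.le_of_eq (qm_add1 _ _)) (Nat.le_refl _)
  · exact qm_sq_lt _ _ _ (qm_sub_lt _ _)
  · exact qm_sq_le _ _ _ _ (Nat.add_le_add (Nat.le_succ _) (Nat.sub_le _ _)) (Nat.le_refl _)
  · exact qm_sq_le _ _ _ _ (Nat.le_of_eq (qm_add1 _ _)) (Nat.le_refl _)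
  · exact qm_sq_le _ _ _ _ (Nat.le_of_eq (qm_add1 _ _)) (Nat.le_refl _)
  · exact qm_sq_le _ _ _ _ (Nat.add_le_add (Nat.le_succ _) (Nat.le_refl _)) (Nat.le_refl _)

def question_mark (expression : String) : String :=
  String.join (qmGoA expression.toList [] [] [])

-- ===== PORT B =====
-- Termination measure helpers for B's while-loop (each frame is
-- (remaining text, output parts, depth, buffer)).
def qmBW (frames : List (List Char × List String × Nat × List Char)) : Nat :=
  (frames.map (fun f => 3 ^ (f.1.length + f.2.2.2.length))).sum

def qmBV (frames : List (List Char × List String × Nat × List Char)) (ret : Option String) : Nat :=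
  2 * ((frames.map (fun f => f.1.length)).sum + frames.length) +
    (if ret.isSome then 1 else 0)

theorem qmB_pow3 {c r b : Nat} (h : c ≤ b) : 3 ^ c + 3 ^ (r + c) < 3 ^ (r + 1 + b) := by
  have e1 : 3 ^ c ≤ 3 ^ (r + b) :=
    Nat.pow_le_pow_right (by decide) (Nat.le_trans h (Nat.le_add_left b r))
  have e2 : 3 ^ (r + c) ≤ 3 ^ (r + b) :=
    Nat.pow_le_pow_right (by decide) (Nat.add_le_add_left h r)
  calc 3 ^ c + 3 ^ (r + c) ≤ 3 ^ (r + b) + 3 ^ (r + b) := Nat.add_le_add e1 e2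
    _ = 3 ^ (r + b) * 2 := by rw [Nat.mul_two]
    _ < 3 ^ (r + b) * 3 := (Nat.mul_lt_mul_left (Nat.pow_pos (by decide))).mpr (by decide)
    _ = 3 ^ (r + b + 1) := by rw [Nat.pow_succ]
    _ = 3 ^ (r + 1 + b) := by rw [Nat.add_right_comm]

theorem qmB_pow_lt (r b S : Nat) : 3 ^ (b - 1) + (3 ^ (r + (b - 1)) + S) < 3 ^ (r + 1 + b) + S := by
  rw [← Nat.add_assoc]
  exact Nat.add_lt_add_right (qmB_pow3 (Nat.sub_le b 1)) S

theorem qmB_pow_lt2 (r b S : Nat) : 3 ^ (r + b) + S < 3 ^ (r + 1 + b) + S :=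
  Nat.add_lt_add_right
    (Nat.lt_of_le_of_lt (Nat.le_add_left (3 ^ (r + b)) (3 ^ b)) (qmB_pow3 (Nat.le_refl b))) S

theorem qm_two (r t l : Nat) : 2 * (r + t + l) < 2 * (r + 1 + t + l) :=
  mul_lt_mul_of_pos_left
    (Nat.add_lt_add_right (Nat.add_lt_add_right (Nat.lt_succ_self r) t) l) (by decide)

-- Literal transliteration of B: while frames ≠ []: merge a pending return into
-- the top frame's output, then consume one character of the top frame (or pop a
-- finished frame, handing "".join(out) to its parent).
def qmB : List (List Char × List String × Nat × List Char) → Option String → String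
  | [], ret => ret.getD ""
  | (rem, out, depth, buf) :: rest, some r =>
      qmB ((rem, out ++ ["(" ++ r ++ ")?"], depth, buf) :: rest) none
  | (rem, out, depth, buf) :: rest, none =>
    match rem with
    | [] => qmB rest (some (String.join out))
    | ch :: rem' =>
      if ch == '{' || ch == '(' || ch == '[' then
        qmB ((rem', out, depth + 1, buf ++ [ch]) :: rest) none
      else if ch == '}' || ch == ')' || ch == ']' then
        if depth ≤ 1 then
          qmB ((buf.drop 1, [], 0, []) :: (rem', out, 0, buf.drop 1) :: rest) none
        else
          qmB ((rem', out, depth - 1, buf ++ [ch]) :: rest) none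
      else if 0 < depth then
        qmB ((rem', out, depth, buf ++ [ch]) :: rest) none
      else
        qmB ((rem', out ++ [String.singleton ch], depth, buf) :: rest) none
termination_by frames ret => (qmBW frames, qmBV frames ret)
decreasing_by
  all_goals simp only [qmBW, qmBV, List.map_cons, List.sum_cons, List.length_cons,
    List.length_append, List.length_drop, List.length_nil, Nat.add_zero, Nat.zero_add,
    Option.isSome_some, Option.isSome_none, Bool.false_eq_true, if_true, if_false]
  · exact Prod.Lex.right _ (Nat.lt_succ_self _)
  · exact Prod.Lex.left _ _ (Nat.lt_add_of_pos_left (Nat.pow_pos (by decide)))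
  · rw [qm_add1]
    exact Prod.Lex.right _ (qm_two _ _ _)
  · exact Prod.Lex.left _ _ (qmB_pow_lt _ _ _)
  · rw [qm_add1]
    exact Prod.Lex.right _ (qm_two _ _ _)
  · rw [qm_add1]
    exact Prod.Lex.right _ (qm_two _ _ _)
  · exact Prod.Lex.left _ _ (qmB_pow_lt2 _ _ _)

def question_mark_alt (expression : String) : String :=
  qmB [(expression.toList, [], 0, [])] none

-- ===== PRECONDITION & SPEC =====
def Spec_question_mark (expression : String) (out : String) : Prop := out = question_mark_alt expression
instance (expression : String) (out : String) : Decidable (Spec_question_mark expression out) := by unfold Spec_question_mark; infer_instance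

-- ===== CLAIM (what is proved, stated in full; the proofs are below) =====
def Claim_equal_question_mark : Prop := ∀ (expression : String), Dom_question_mark expression → Spec_question_mark expression (question_mark expression)

-- ===== LEMMAS AND PROOFS =====

-- `groups[:-1] == ""` in A corresponds to `depth <= 1` in B.
theorem qm_dropLast_nil (l : List Char) : l.dropLast = [] ↔ l.length ≤ 1 := by
  cases l with
  | nil => simp
  | cons a t => cases t <;> simp

-- Simulation invariant: running B's machine on a top frame whose depth is
-- `groups.length` behaves like finishing A's loop from state (stack, groups, in_group)
-- and handing the joined result to the frames below.
theorem qmB_sim (l : List Char) (stack : List String) (groups in_group : List Char)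
    (rest : List (List Char × List String × Nat × List Char)) :
    qmB ((l, stack, groups.length, in_group) :: rest) none
      = qmB rest (some (String.join (qmGoA l stack groups in_group))) := by
  induction l, stack, groups, in_group using qmGoA.induct generalizing rest with
  | case1 stack groups ig =>
    conv_lhs => rw [qmB]
    conv_rhs => rw [qmGoA]
  | case2 ch rest' stack groups ig hop ih =>
    have hbo : (ch == '{' || ch == '(' || ch == '[') = true := by simpa [or_assoc] using hop
    conv_lhs => rw [qmB]
    conv_rhs => rw [qmGoA]
    rw [if_pos hbo, if_pos hop]
    simpa using ih rest
  | case3 ch rest' stack groups ig hnop hcl hdl ih2 ih1 =>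
    have hbo : ¬ ((ch == '{' || ch == '(' || ch == '[') = true) := by simpa [and_assoc] using hnop
    have hbc : (ch == '}' || ch == ')' || ch == ']') = true := by simpa [or_assoc] using hcl
    have hlen : groups.length ≤ 1 := (qm_dropLast_nil groups).mp hdl
    conv_lhs => rw [qmB]
    conv_rhs => rw [qmGoA]
    rw [if_neg hbo, if_pos hbc, if_pos hlen, if_neg hnop, if_pos hcl, if_pos hdl]
    simp only [hdl, List.length_nil] at ih1 ih2 ⊢
    rw [ih2 ((rest', stack, 0, List.drop 1 ig) :: rest)]
    conv_lhs => rw [qmB]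
    exact ih1 rest
  | case4 ch rest' stack groups ig hnop hcl hdl ih1 =>
    have hbo : ¬ ((ch == '{' || ch == '(' || ch == '[') = true) := by simpa [and_assoc] using hnop
    have hbc : (ch == '}' || ch == ')' || ch == ']') = true := by simpa [or_assoc] using hcl
    have hlen : ¬ (groups.length ≤ 1) := fun h => hdl ((qm_dropLast_nil groups).mpr h)
    conv_lhs => rw [qmB]
    conv_rhs => rw [qmGoA]
    rw [if_neg hbo, if_pos hbc, if_neg hlen, if_neg hnop, if_pos hcl, if_neg hdl]
    have h := ih1 rest
    simp only [List.length_dropLast] at h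
    exact h
  | case5 ch rest' stack groups ig hnop hncl hne ih1 =>
    have hbo : ¬ ((ch == '{' || ch == '(' || ch == '[') = true) := by simpa [and_assoc] using hnop
    have hbc : ¬ ((ch == '}' || ch == ')' || ch == ']') = true) := by simpa [and_assoc] using hncl
    have hpos : 0 < groups.length := by
      cases groups with
      | nil => exact absurd rfl hne
      | cons a t => simp
    conv_lhs => rw [qmB]
    conv_rhs => rw [qmGoA]
    rw [if_neg hbo, if_neg hbc, if_pos hpos, if_neg hnop, if_neg hncl, if_pos hne]
    exact ih1 rest
  | case6 ch rest' stack groups ig hnop hncl hne ih1 =>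
    have hbo : ¬ ((ch == '{' || ch == '(' || ch == '[') = true) := by simpa [and_assoc] using hnop
    have hbc : ¬ ((ch == '}' || ch == ')' || ch == ']') = true) := by simpa [and_assoc] using hncl
    have hpos : ¬ (0 < groups.length) := by
      rw [not_not.mp hne]
      simp
    conv_lhs => rw [qmB]
    conv_rhs => rw [qmGoA]
    rw [if_neg hbo, if_neg hbc, if_neg hpos, if_neg hnop, if_neg hncl, if_neg hne]
    exact ih1 rest

-- ===== VERDICT (by name: the statement is the Claim_ definition above) =====
theorem question_mark_spec : Claim_equal_question_mark := by
  intro expression _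
  unfold Spec_question_mark question_mark question_mark_alt
  have h := qmB_sim expression.toList [] [] [] []
  simp only [List.length_nil] at h
  rw [h]
  simp [qmB]
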